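-- pv_equiv track=rewrite | github.com/sdjasj/BUAA_2022_OO_judge | HW9/test.py | varD
-- ===== SOURCE A (Python) =====
-- def average2(alist:list):
--     ans = 0
--     for ele in alist:
--         ans += ele
--     return ans // len(alist)
--
-- def varD(alist:list):
--     aver = average2(alist)
--     anspow = 0
--     anssum = 0
--     for ele in alist:
--         anspow += ele * ele
--         anssum += ele
--     return (anspow - 2 * aver * anssum + len(alist) * aver * aver) // len(alist)
-- ===== SOURCE B (Python) =====
-- def varD(alist: list):
--     aver = sum(alist) // len(alist)
--     return sum((x - aver) ** 2 for x in alist) // len(alist)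
-- ===== Notes on version B (the rewrite author's own statement) =====
-- stated objective: simpler
-- what changed: B inlines the average (sum//len) and accumulates the sum of squared deviations in one comprehension instead of A's separate sum-of-squares and sum accumulators combined by the expansion formula.
import Mathlib
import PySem

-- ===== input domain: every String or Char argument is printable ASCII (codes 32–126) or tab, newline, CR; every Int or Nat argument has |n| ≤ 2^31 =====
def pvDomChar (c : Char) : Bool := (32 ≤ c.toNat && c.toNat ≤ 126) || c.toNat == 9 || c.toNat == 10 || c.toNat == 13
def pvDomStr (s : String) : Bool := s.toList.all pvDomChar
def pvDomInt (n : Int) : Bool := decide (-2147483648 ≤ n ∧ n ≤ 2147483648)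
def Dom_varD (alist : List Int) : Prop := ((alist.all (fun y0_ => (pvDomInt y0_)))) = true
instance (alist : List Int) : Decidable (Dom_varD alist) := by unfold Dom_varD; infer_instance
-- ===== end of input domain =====

-- B computes the average once and sums squared deviations in one pass; the objective is a simpler decomposition, not speed.

-- ===== PORT A =====
def average2 (alist : List Int) : Int :=
  let ans := alist.foldl (fun ans ele => ans + ele) 0
  PySem.Int.floordiv ans (alist.length : Int)

def varD (alist : List Int) : Int :=
  let aver := average2 alist
  let st := alist.foldl (fun (p : Int × Int) ele => (p.1 + ele * ele, p.2 + ele)) (0, 0)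
  PySem.Int.floordiv (st.1 - 2 * aver * st.2 + (alist.length : Int) * aver * aver) (alist.length : Int)

-- ===== PORT B =====
def varD_alt (alist : List Int) : Int :=
  let aver := PySem.Int.floordiv alist.sum (alist.length : Int)
  PySem.Int.floordiv (alist.map (fun x => (x - aver) ^ 2)).sum (alist.length : Int)

-- ===== PRECONDITION & SPEC =====
-- A (and B) raise ZeroDivisionError on the empty list; Pre_ requires a non-empty list.
def Pre_varD (alist : List Int) : Prop := alist ≠ []
instance (alist : List Int) : Decidable (Pre_varD alist) := by unfold Pre_varD; infer_instance
def pvWitness_varD : List Int := [1, 2, 4]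

def Spec_varD (alist : List Int) (out : Int) : Prop := out = varD_alt alist
instance (alist : List Int) (out : Int) : Decidable (Spec_varD alist out) := by unfold Spec_varD; infer_instance

-- ===== CLAIM (what is proved, stated in full; the proofs are below) =====
def Claim_equal_varD : Prop := ∀ (alist : List Int), Dom_varD alist → Pre_varD alist → Spec_varD alist (varD alist)

-- ===== LEMMAS AND PROOFS =====

theorem foldl_add_sum (l : List Int) (a : Int) :
    l.foldl (fun ans ele => ans + ele) a = a + l.sum := by
  induction l generalizing a with
  | nil => simp
  | cons x xs ih => simp [List.foldl, ih, List.sum_cons]; ring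

theorem foldl_pair_sums (l : List Int) (p : Int × Int) :
    l.foldl (fun (p : Int × Int) ele => (p.1 + ele * ele, p.2 + ele)) p
      = (p.1 + (l.map (fun x => x * x)).sum, p.2 + l.sum) := by
  induction l generalizing p with
  | nil => simp
  | cons x xs ih => simp [List.foldl, ih, List.sum_cons]; constructor <;> ring

theorem dev_sum (l : List Int) (a : Int) :
    (l.map (fun x => (x - a) ^ 2)).sum
      = (l.map (fun x => x * x)).sum - 2 * a * l.sum + (l.length : Int) * a * a := by
  induction l with
  | nil => simp
  | cons x xs ih =>
    simp [List.sum_cons, ih]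
    ring

-- ===== VERDICT (by name: the statement is the Claim_ definition above) =====
theorem varD_spec : Claim_equal_varD := by
  intro alist _ _
  unfold Spec_varD varD varD_alt average2
  simp only [foldl_add_sum, foldl_pair_sums, dev_sum, zero_add]
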